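-- pv_equiv track=rewrite | github.com/gepaohhh/1ai-knowledge-graph-exp | OutPut/Json2CSV.py | build_node_ids
-- ===== SOURCE A (Python) =====
-- def build_node_ids(json_data):
--     node_names = set()
--     for d in json_data:
--         node_names.add(d['subject'])
--         node_names.add(d['object'])
--     node_ids = {}
--     for idx, name in enumerate(sorted(node_names), start=1):
--         node_ids[name] = idx
--     return node_ids
-- ===== SOURCE B (Python) =====
-- def build_node_ids(json_data):
--     names = []
--     for d in json_data:
--         names.append(d['subject'])
--         names.append(d['object'])
--     node_ids = {}
--     idx = 0
--     while names:
--         m = min(names)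
--         idx += 1
--         node_ids[m] = idx
--         names = [x for x in names if x != m]
--     return node_ids
-- ===== Notes on version B (the rewrite author's own statement) =====
-- stated objective: alternative
-- what changed: A dedups the names into a set, sorts the deduped names and enumerates them; B never sorts: it repeatedly extracts the minimum of the remaining flat name list (selection-style), assigning the next id and filtering out all copies of that minimum until the list is empty.
import Mathlib
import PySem

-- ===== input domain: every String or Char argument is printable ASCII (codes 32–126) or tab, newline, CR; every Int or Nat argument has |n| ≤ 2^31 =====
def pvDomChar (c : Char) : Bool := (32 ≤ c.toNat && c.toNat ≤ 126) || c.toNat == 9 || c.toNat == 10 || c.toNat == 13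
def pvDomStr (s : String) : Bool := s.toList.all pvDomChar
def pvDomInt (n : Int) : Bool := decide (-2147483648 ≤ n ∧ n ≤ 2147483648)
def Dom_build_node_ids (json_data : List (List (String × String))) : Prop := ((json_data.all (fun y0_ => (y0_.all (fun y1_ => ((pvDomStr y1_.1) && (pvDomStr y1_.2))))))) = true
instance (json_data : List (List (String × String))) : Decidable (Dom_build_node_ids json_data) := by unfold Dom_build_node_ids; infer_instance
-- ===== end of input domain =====

-- B replaces A's dedup-into-a-set-then-sort-then-enumerate with a selection-style loop that never
-- sorts: it repeatedly extracts the minimum of the remaining flat name list, assigns the next id,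
-- and filters out all copies of that minimum (alternative decomposition, not claimed faster).

-- ===== PORT A =====
-- d['subject'] / d['object']: first-match lookup; Pre_ guarantees the key is present (Python raises KeyError otherwise)
def pvLookup (d : List (String × String)) (k : String) : String :=
  (((PySem.Dict.mk d).get? k).getD "")

def build_node_ids (json_data : List (List (String × String))) : List (String × Int) :=
  let node_names : PySem.Set String :=
    json_data.foldl (fun s d => PySem.Set.add (PySem.Set.add s (pvLookup d "subject")) (pvLookup d "object")) PySem.Set.empty
  let node_ids : PySem.Dict String Int :=
    (PySem.List.enumerate (PySem.List.sorted node_names (fun x => x)) 1).foldl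
      (fun nd p => nd.insert p.2 p.1) (PySem.Dict.mk [])
  node_ids.items

-- ===== PORT B =====
-- termination fact for B's while loop: min(names) is a member (and a lower bound)
lemma pvMin_spec (xs : List String) (h : ¬ xs = []) :
    ((PySem.List.min? xs (fun x => x)).getD "") ∈ xs
      ∧ ∀ y ∈ xs, ((PySem.List.min? xs (fun x => x)).getD "") ≤ y := by
  obtain ⟨y, hy⟩ := Option.ne_none_iff_exists'.mp
    (fun hn => h ((PySem.List.min?_eq_none_iff xs (fun x => x)).mp hn))
  refine ⟨?_, ?_⟩
  · have := PySem.List.min?_mem hy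
    simpa [hy] using this
  · intro z hz
    have := PySem.List.min?_isMin hy z hz
    simpa [hy] using this

-- the 'while names:' loop of Source B: min(names) is PySem.List.min? (names nonempty inside the loop)
def pvBLoop (names : List String) (node_ids : PySem.Dict String Int) (idx : Int) : PySem.Dict String Int :=
  if h : names = [] then node_ids
  else
    let m := ((PySem.List.min? names (fun x => x)).getD "")
    pvBLoop (names.filter (fun x => x ≠ m)) (node_ids.insert m (idx + 1)) (idx + 1)
termination_by names.length
decreasing_by
  have hmem : (⟨(PySem.List.min? names fun x => x).getD "", (pvMin_spec names h).1⟩ : {x // x ∈ names}) ∈ names.attach := List.mem_attach _ _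
  simp only [List.length_unattach]
  rw [← List.length_attach (l := names)]
  exact List.length_filter_lt_length_iff_exists.mpr ⟨_, hmem, by simp⟩

def build_node_ids_alt (json_data : List (List (String × String))) : List (String × Int) :=
  let names : List String :=
    json_data.foldl (fun acc d => acc ++ [pvLookup d "subject", pvLookup d "object"]) []
  (pvBLoop names (PySem.Dict.mk []) 0).items

-- ===== PRECONDITION & SPEC =====
-- Pre_ excludes exactly the inputs on which the Python A (and B) raises KeyError: a dict missing 'subject' or 'object'.
def Pre_build_node_ids (json_data : List (List (String × String))) : Prop :=
  ∀ d ∈ json_data, (PySem.Dict.mk d).contains "subject" = true ∧ (PySem.Dict.mk d).contains "object" = true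
instance (json_data : List (List (String × String))) : Decidable (Pre_build_node_ids json_data) := by
  unfold Pre_build_node_ids; infer_instance

def pvWitness_build_node_ids : (List (List (String × String))) :=
  [[("subject", "b"), ("object", "a")], [("subject", "a"), ("object", "c")]]

def Spec_build_node_ids (json_data : List (List (String × String))) (out : List (String × Int)) : Prop := out = build_node_ids_alt json_data
instance (json_data : List (List (String × String))) (out : List (String × Int)) : Decidable (Spec_build_node_ids json_data out) := by unfold Spec_build_node_ids; infer_instance

-- ===== CLAIM (what is proved, stated in full; the proofs are below) =====
def Claim_equal_build_node_ids : Prop := ∀ (json_data : List (List (String × String))), Dom_build_node_ids json_data → Pre_build_node_ids json_data → Spec_build_node_ids json_data (build_node_ids json_data)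

-- ===== LEMMAS AND PROOFS =====

lemma pvFilter_len_lt (xs : List String) (h : ¬ xs = []) :
    (xs.filter (fun x => x ≠ ((PySem.List.min? xs (fun x => x)).getD ""))).length < xs.length :=
  List.length_filter_lt_length_iff_exists.mpr ⟨_, (pvMin_spec xs h).1, by simp⟩


-- the flat name list both programs draw from
def pvNames (json_data : List (List (String × String))) : List String :=
  json_data.flatMap (fun d => [pvLookup d "subject", pvLookup d "object"])

-- A's set-building loop is Set.ofList of the flat name list
lemma foldl_add2_eq_update (json_data : List (List (String × String))) (s : PySem.Set String) :
    json_data.foldl (fun s d => PySem.Set.add (PySem.Set.add s (pvLookup d "subject")) (pvLookup d "object")) s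
      = PySem.Set.update s (pvNames json_data) := by
  induction json_data generalizing s with
  | nil => simp [pvNames, PySem.Set.update]
  | cons d t ih => simp [pvNames, PySem.Set.update, List.foldl] at *; exact ih _

-- A's enumerate-and-insert loop over the nodup sorted names, as a plain map
lemma a_dict_items (u : List String) (hu : u.Nodup) :
    ((PySem.List.enumerate u 1).foldl (fun nd p => nd.insert p.2 p.1) (PySem.Dict.mk [])).items
      = (PySem.List.enumerate u 1).map (fun p => (p.2, p.1)) := by
  have h := PySem.Dict.items_foldl_insert_fresh (PySem.List.enumerate u 1)
    (fun p => p.2) (fun p => p.1) (PySem.Dict.mk ([] : List (String × Int)))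
    (by intro a _; rfl)
    (by rw [PySem.List.map_snd_enumerate]; exact hu)
  simpa using h

-- the sequence of minima B's loop extracts
def pvMinSort (xs : List String) : List String :=
  if h : xs = [] then []
  else
    ((PySem.List.min? xs (fun x => x)).getD "")
      :: pvMinSort (xs.filter (fun x => x ≠ ((PySem.List.min? xs (fun x => x)).getD "")))
termination_by xs.length
decreasing_by
  have hmem : (⟨(PySem.List.min? xs fun x => x).getD "", (pvMin_spec xs h).1⟩ : {x // x ∈ xs}) ∈ xs.attach := List.mem_attach _ _
  simp only [List.length_unattach]
  rw [← List.length_attach (l := xs)]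
  exact List.length_filter_lt_length_iff_exists.mpr ⟨_, hmem, by simp⟩

lemma pvMinSort_nil : pvMinSort [] = [] := by rw [pvMinSort.eq_def]; simp

lemma pvMinSort_cons (xs : List String) (h : ¬ xs = []) :
    pvMinSort xs = ((PySem.List.min? xs (fun x => x)).getD "")
      :: pvMinSort (xs.filter (fun x => x ≠ ((PySem.List.min? xs (fun x => x)).getD ""))) := by
  rw [pvMinSort.eq_def, dif_neg h]

lemma mem_pvMinSort : ∀ (n : Nat) (xs : List String), xs.length ≤ n →
    ∀ a, (a ∈ pvMinSort xs ↔ a ∈ xs) := by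
  intro n
  induction n with
  | zero =>
    intro xs hlen a
    rw [List.eq_nil_of_length_eq_zero (Nat.le_zero.mp hlen), pvMinSort_nil]
  | succ n ih =>
    intro xs hlen a
    by_cases h : xs = []
    · rw [h, pvMinSort_nil]
    · rw [pvMinSort_cons xs h]
      have hrec := ih (xs.filter (fun x => x ≠ ((PySem.List.min? xs (fun x => x)).getD "")))
        (by have := pvFilter_len_lt xs h; omega) a
      rw [List.mem_cons, hrec, List.mem_filter]
      constructor
      · rintro (rfl | ⟨ha, _⟩)
        · exact (pvMin_spec xs h).1
        · exact ha
      · intro ha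
        by_cases hax : a = ((PySem.List.min? xs (fun x => x)).getD "")
        · exact Or.inl hax
        · exact Or.inr ⟨ha, by simp [hax]⟩

lemma pairwise_lt_pvMinSort : ∀ (n : Nat) (xs : List String), xs.length ≤ n →
    (pvMinSort xs).Pairwise (· < ·) := by
  intro n
  induction n with
  | zero =>
    intro xs hlen
    rw [List.eq_nil_of_length_eq_zero (Nat.le_zero.mp hlen), pvMinSort_nil]
    exact List.Pairwise.nil
  | succ n ih =>
    intro xs hlen
    by_cases h : xs = []
    · rw [h, pvMinSort_nil]; exact List.Pairwise.nil
    · rw [pvMinSort_cons xs h]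
      have hlt := pvFilter_len_lt xs h
      refine List.Pairwise.cons ?_ (ih _ (by omega))
      intro b hb
      rw [mem_pvMinSort n _ (by omega), List.mem_filter] at hb
      have hmin := (pvMin_spec xs h).2 b hb.1
      have hne : b ≠ ((PySem.List.min? xs (fun x => x)).getD "") := by simpa using hb.2
      exact lt_of_le_of_ne hmin (Ne.symm hne)

lemma nodup_pvMinSort (xs : List String) : (pvMinSort xs).Nodup :=
  (pairwise_lt_pvMinSort xs.length xs le_rfl).imp ne_of_lt

-- B's extraction order IS sorted(set(names))
lemma pvMinSort_eq_sorted (xs : List String) :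
    PySem.List.sorted (PySem.Set.ofList xs) (fun x => x) = pvMinSort xs := by
  apply PySem.List.sorted_eq_of_perm_of_pairwise_lt
  · refine (List.perm_ext_iff_of_nodup (nodup_pvMinSort xs)
      (PySem.Set.nodup_ofList _)).mpr ?_
    intro a
    rw [mem_pvMinSort xs.length xs le_rfl, PySem.Set.mem_ofList]
  · exact pairwise_lt_pvMinSort xs.length xs le_rfl

-- B's loop invariant: with the ids of a prefix t already in the dict and idx = |t|,
-- the loop appends the extracted minima with consecutive ids
lemma pvBLoop_inv : ∀ (n : Nat) (xs t : List String), xs.length ≤ n → (∀ x ∈ xs, x ∉ t) →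
    pvBLoop xs (PySem.Dict.mk ((PySem.List.enumerate t 1).map (fun p => (p.2, p.1)))) (t.length : Int)
      = PySem.Dict.mk ((PySem.List.enumerate (t ++ pvMinSort xs) 1).map (fun p => (p.2, p.1))) := by
  intro n
  induction n with
  | zero =>
    intro xs t hlen _
    rw [List.eq_nil_of_length_eq_zero (Nat.le_zero.mp hlen), pvBLoop.eq_def, pvMinSort_nil]
    simp
  | succ n ih =>
    intro xs t hlen hdisj
    by_cases h : xs = []
    · rw [h, pvBLoop.eq_def, pvMinSort_nil]; simp
    · have hmem := (pvMin_spec xs h).1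
      have hcont : (PySem.Dict.mk ((PySem.List.enumerate t 1).map (fun p => (p.2, p.1)))).contains
          ((PySem.List.min? xs (fun x => x)).getD "") = false := by
        rw [PySem.Dict.contains_eq_decide_mem_keys]
        simp only [PySem.Dict.keys, List.map_map]
        have hc : ((fun p => p.1) ∘ fun (p : Int × String) => (p.2, p.1)) = fun p => p.2 := rfl
        rw [hc, PySem.List.map_snd_enumerate]
        exact decide_eq_false (hdisj _ hmem)
      have hins : (PySem.Dict.mk ((PySem.List.enumerate t 1).map (fun p => (p.2, p.1)))).insert
            ((PySem.List.min? xs (fun x => x)).getD "") ((t.length : Int) + 1)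
          = PySem.Dict.mk ((PySem.List.enumerate (t ++ [((PySem.List.min? xs (fun x => x)).getD "")]) 1).map
              (fun p => (p.2, p.1))) := by
        unfold PySem.Dict.insert
        rw [if_neg (by simp [hcont])]
        simp [PySem.List.enumerate_append, PySem.List.enumerate, add_comm]
      rw [pvBLoop.eq_def, dif_neg h]
      simp only [hins]
      have hdisj' : ∀ x ∈ xs.filter (fun x => x ≠ ((PySem.List.min? xs (fun x => x)).getD "")),
          x ∉ t ++ [((PySem.List.min? xs (fun x => x)).getD "")] := by
        intro x hx
        rw [List.mem_filter] at hx
        simp only [List.mem_append, List.mem_singleton]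
        rintro (hxt | hxm)
        · exact hdisj x hx.1 hxt
        · exact absurd hxm (by simpa using hx.2)
      have hlt := pvFilter_len_lt xs h
      have hrec := ih _ (t ++ [((PySem.List.min? xs (fun x => x)).getD "")]) (by omega) hdisj'
      have hlen1 : ((t.length : Int) + 1)
          = (((t ++ [((PySem.List.min? xs (fun x => x)).getD "")]).length : Nat) : Int) := by simp
      rw [hlen1]
      rw [hrec, pvMinSort_cons xs h]
      simp

-- ===== VERDICT (by name: the statement is the Claim_ definition above) =====
theorem build_node_ids_spec : Claim_equal_build_node_ids := by
  intro json_data _ _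
  show build_node_ids json_data = build_node_ids_alt json_data
  unfold build_node_ids build_node_ids_alt
  dsimp only
  rw [PySem.List.foldl_append_eq_flatMap, List.nil_append]
  have hn : List.flatMap (fun d => [pvLookup d "subject", pvLookup d "object"]) json_data
      = pvNames json_data := rfl
  rw [hn, foldl_add2_eq_update]
  have hA : PySem.Set.update PySem.Set.empty (pvNames json_data)
      = PySem.Set.ofList (pvNames json_data) := by
    rw [PySem.Set.ofList_eq_foldl]; rfl
  rw [hA]
  have hB := pvBLoop_inv (pvNames json_data).length (pvNames json_data) [] le_rfl (by simp)
  simp only [PySem.List.enumerate_nil, List.map_nil, List.length_nil, Nat.cast_zero,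
    List.nil_append] at hB
  rw [hB]
  rw [a_dict_items _ ((PySem.List.sorted_perm _ _ _).nodup_iff.mpr (PySem.Set.nodup_ofList _)),
    pvMinSort_eq_sorted]
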